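-- pv_equiv track=rewrite | github.com/yarinl3/Queue-Management-System | queue-management/protocol_parse.py | make_blocks_to_protocol
-- ===== SOURCE A (Python) =====
-- def make_blocks_to_protocol(arg):
--     string = ''
--     word = ''
--     words = []
--     word_index = 0
--     arg = str(arg)
--     for i in arg:
--         word += i
--         if len(word) == 27:
--             words.append(str(word_index).zfill(3) + word)
--             word_index += 1
--             word = ''
--     if word != '':
--         words.append(str(word_index).zfill(3) + word.ljust(27))
--     for i in words:
--         string += i
--     return string
-- ===== SOURCE B (Python) =====
-- def make_blocks_to_protocol(arg):
--     arg = str(arg)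
--     pieces = []
--     i = 0
--     while i < len(arg):
--         pieces.append(str(i // 27).zfill(3) + arg[i:i+27].ljust(27))
--         i += 27
--     return ''.join(pieces)
-- ===== Notes on version B (the rewrite author's own statement) =====
-- stated objective: faster
-- what changed: Replaces A's char-by-char accumulator with its len==27 emit branch and separate padded-tail append by a loop over offsets i = 0, 27, 54, ... that slices arg[i:i+27].ljust(27), prefixes str(i//27).zfill(3), and joins the pieces.
import Mathlib
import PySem

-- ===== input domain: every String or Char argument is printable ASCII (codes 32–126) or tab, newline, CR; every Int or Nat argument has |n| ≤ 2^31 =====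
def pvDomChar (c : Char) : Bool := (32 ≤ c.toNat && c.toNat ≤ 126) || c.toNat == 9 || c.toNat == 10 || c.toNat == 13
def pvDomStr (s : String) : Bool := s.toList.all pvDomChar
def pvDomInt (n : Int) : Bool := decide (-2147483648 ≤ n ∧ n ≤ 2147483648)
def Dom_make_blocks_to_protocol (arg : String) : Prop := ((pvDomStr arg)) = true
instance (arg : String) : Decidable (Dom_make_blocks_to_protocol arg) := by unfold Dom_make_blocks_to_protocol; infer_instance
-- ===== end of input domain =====

-- B replaces A's char-by-char accumulation (emit on len==27, pad the leftover tail) by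
-- slicing the 27-char block at each offset i and joining the pieces (measured faster by a constant factor).

-- s.ljust(27): right-pad with spaces to width 27 (exact hand port: Nat subtraction = Python's max)
def pvLjust27 (cs : List Char) : List Char := cs ++ List.replicate (27 - cs.length) ' '

-- ===== PORT A =====
-- A's for-loop over the characters, carrying (word, words, word_index); after the loop the
-- nonempty leftover word is appended padded.  str(arg) is the identity on a String argument.
def pvBlocksA : List Char → List Char → List (List Char) → Int → List (List Char)
  | [], word, words, idx =>
      if word ≠ [] then
        words ++ [PySem.Chars.zfill (PySem.Int.toChars idx) 3 ++ pvLjust27 word]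
      else words
  | c :: rest, word, words, idx =>
      let w := word ++ [c]
      if w.length = 27 then
        pvBlocksA rest [] (words ++ [PySem.Chars.zfill (PySem.Int.toChars idx) 3 ++ w]) (idx + 1)
      else
        pvBlocksA rest w words idx

def make_blocks_to_protocol (arg : String) : String :=
  -- final loop: string += i over words
  String.ofList ((pvBlocksA arg.toList [] [] 0).foldl (· ++ ·) [])

-- ===== PORT B =====
-- B's while-loop over offsets i = 0, 27, 54, …: emit str(i//27).zfill(3) + arg[i:i+27].ljust(27).
-- The offset i only ever holds 0,27,…, so it is carried as a Nat (cast to Int for // and the slice).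
def pvBlocksB (cs : List Char) (i : Nat) : List Char :=
  if i < cs.length then
    PySem.Chars.zfill (PySem.Int.toChars (PySem.Int.floordiv (i : Int) 27)) 3
      ++ pvLjust27 (PySem.List.slice cs (some (i : Int)) (some ((i : Int) + 27)))
      ++ pvBlocksB cs (i + 27)
  else []
  termination_by cs.length - i
  decreasing_by omega

def make_blocks_to_protocol_alt (arg : String) : String :=
  String.ofList (pvBlocksB arg.toList 0)

-- ===== PRECONDITION & SPEC =====
def Spec_make_blocks_to_protocol (arg : String) (out : String) : Prop := out = make_blocks_to_protocol_alt arg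
instance (arg : String) (out : String) : Decidable (Spec_make_blocks_to_protocol arg out) := by unfold Spec_make_blocks_to_protocol; infer_instance

-- ===== CLAIM (what is proved, stated in full; the proofs are below) =====
def Claim_equal_make_blocks_to_protocol : Prop := ∀ (arg : String), Dom_make_blocks_to_protocol arg → Spec_make_blocks_to_protocol arg (make_blocks_to_protocol arg)

-- ===== LEMMAS AND PROOFS =====

-- proof-only intermediate form of B: recursion on the remaining suffix with the block index
def pvBlocksRem (rest : List Char) (idx : Int) : List Char :=
  if rest = [] then []
  else
    PySem.Chars.zfill (PySem.Int.toChars idx) 3 ++ pvLjust27 (rest.take 27)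
      ++ pvBlocksRem (rest.drop 27) (idx + 1)
  termination_by rest.length
  decreasing_by
    rename_i h
    have : rest.length ≠ 0 := by simpa using h
    simp; omega

theorem pvFoldlFlatten (ws : List (List Char)) (init : List Char) :
    ws.foldl (· ++ ·) init = init ++ ws.flatten := by
  induction ws generalizing init with
  | nil => simp
  | cons w ws ih => simp [List.foldl_cons, ih, List.append_assoc]

-- A's loop, flattened, is pvBlocksRem of the pending word joined with the rest of the input
theorem pvKey (cs : List Char) : ∀ (word : List Char) (words : List (List Char)) (idx : Int),
    word.length < 27 →
    (pvBlocksA cs word words idx).flatten = words.flatten ++ pvBlocksRem (word ++ cs) idx := by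
  induction cs with
  | nil =>
    intro word words idx hw
    cases word with
    | nil => rw [pvBlocksRem.eq_def]; simp [pvBlocksA]
    | cons c w =>
      simp only [pvBlocksA, List.append_nil]
      rw [pvBlocksRem.eq_def]
      have h1 : (c :: w).take 27 = c :: w := List.take_of_length_le (by omega)
      have h2 : (c :: w).drop 27 = [] := List.drop_of_length_le (by omega)
      simp only [h1, h2, reduceCtorEq, if_false]
      rw [pvBlocksRem.eq_def]
      simp
  | cons c rest ih =>
    intro word words idx hw
    simp only [pvBlocksA]
    by_cases h : (word ++ [c]).length = 27
    · simp only [h, if_true]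
      rw [ih [] _ _ (by simp)]
      have hb : pvBlocksRem (word ++ c :: rest) idx
          = PySem.Chars.zfill (PySem.Int.toChars idx) 3 ++ (word ++ [c]) ++ pvBlocksRem rest (idx + 1) := by
        have hne : word ++ c :: rest ≠ [] := by simp
        rw [pvBlocksRem.eq_def]
        simp only [hne, if_false]
        have hwc : word ++ c :: rest = (word ++ [c]) ++ rest := by simp
        have ht : (word ++ c :: rest).take 27 = word ++ [c] := by
          rw [hwc, ← h, List.take_left]
        have hd : (word ++ c :: rest).drop 27 = rest := by
          rw [hwc, ← h, List.drop_left]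
        rw [ht, hd]
        have : pvLjust27 (word ++ [c]) = word ++ [c] := by
          simp [pvLjust27, h]
        rw [this, List.append_assoc]
      rw [hb]
      simp [List.append_assoc]
    · simp only [h, if_false]
      rw [ih (word ++ [c]) _ _ (by simp at h ⊢; omega)]
      simp

-- B's offset loop computes pvBlocksRem of the suffix at offset 27*k with block index k
theorem pvBridge (cs : List Char) : ∀ (k : Nat),
    pvBlocksB cs (27 * k) = pvBlocksRem (cs.drop (27 * k)) (k : Int) := by
  have H : ∀ (n : Nat) (k : Nat), cs.length - 27 * k ≤ n →
      pvBlocksB cs (27 * k) = pvBlocksRem (cs.drop (27 * k)) (k : Int) := by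
    intro n
    induction n with
    | zero =>
      intro k hk
      have hge : cs.length ≤ 27 * k := by omega
      rw [pvBlocksB.eq_def, pvBlocksRem.eq_def]
      simp [List.drop_of_length_le hge, Nat.not_lt.mpr hge]
    | succ n ihn =>
      intro k hk
      by_cases hlt : 27 * k < cs.length
      · rw [pvBlocksB.eq_def]
        simp only [hlt, if_true]
        rw [pvBlocksRem.eq_def]
        have hne : cs.drop (27 * k) ≠ [] := by
          simp [List.drop_eq_nil_iff]; omega
        simp only [hne, if_false]
        have hfd : PySem.Int.floordiv ((27 * k : Nat) : Int) 27 = (k : Int) := by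
          simp
        have hsl : PySem.List.slice cs (some ((27 * k : Nat) : Int)) (some (((27 * k : Nat) : Int) + 27))
            = (cs.drop (27 * k)).take 27 := by
          have := PySem.List.slice_natCast_add cs (27 * k) 27
          simpa using this
        have hdd : cs.drop (27 * k + 27) = (cs.drop (27 * k)).drop 27 := by
          rw [List.drop_drop]
        have hrec : pvBlocksB cs (27 * k + 27) = pvBlocksRem (cs.drop (27 * (k + 1))) ((k : Int) + 1) := by
          have h27 : 27 * k + 27 = 27 * (k + 1) := by omega
          rw [h27, ihn (k + 1) (by omega)]
          push_cast
          rfl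
        rw [hfd, hsl, hrec]
        have h27 : 27 * (k + 1) = 27 * k + 27 := by omega
        rw [h27, hdd]
      · rw [pvBlocksB.eq_def, pvBlocksRem.eq_def]
        have hge : cs.length ≤ 27 * k := by omega
        simp [List.drop_of_length_le hge, hlt]
  exact fun k => H (cs.length - 27 * k) k le_rfl

-- ===== VERDICT (by name: the statement is the Claim_ definition above) =====
theorem make_blocks_to_protocol_spec : Claim_equal_make_blocks_to_protocol := by
  intro arg _
  unfold Spec_make_blocks_to_protocol make_blocks_to_protocol make_blocks_to_protocol_alt
  rw [pvFoldlFlatten, pvKey arg.toList [] [] 0 (by simp)]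
  have := pvBridge arg.toList 0
  simp only [Nat.mul_zero, List.drop_zero, Int.natCast_zero] at this
  rw [this]
  simp
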